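-- pv_equiv track=rewrite | github.com/ZrpChuang/steering | src/pre_diss_llava/diss_run_1000/75dd.py | contiguous_spans
-- ===== SOURCE A (Python) =====
-- from typing import List, Tuple, Dict, Any, Optional
--
-- def contiguous_spans(token_types: List[str], target: str) -> List[Tuple[int, int]]:
--     spans: List[Tuple[int, int]] = []
--     i = 0
--     n = len(token_types)
--     while i < n:
--         if token_types[i] != target:
--             i += 1
--             continue
--         j = i
--         while j + 1 < n and token_types[j + 1] == target:
--             j += 1
--         spans.append((i, j))
--         i = j + 1
--     return spans
-- ===== SOURCE B (Python) =====
-- def contiguous_spans(token_types, target):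
--     spans = []
--     run_start = None
--     for i, t in enumerate(token_types):
--         if t == target:
--             if run_start is None:
--                 run_start = i
--         else:
--             if run_start is not None:
--                 spans.append((run_start, i - 1))
--                 run_start = None
--     if run_start is not None:
--         spans.append((run_start, len(token_types) - 1))
--     return spans
-- ===== Notes on version B (the rewrite author's own statement) =====
-- stated objective: simpler
-- what changed: Replaced A's index-based while loop with a nested look-ahead scan (which finds each run's end before appending and jumps i past it) by a single flat for-loop over enumerate maintaining an optional run_start, closing a span when the run ends and flushing the trailing open run after the loop.
import Mathlib
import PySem

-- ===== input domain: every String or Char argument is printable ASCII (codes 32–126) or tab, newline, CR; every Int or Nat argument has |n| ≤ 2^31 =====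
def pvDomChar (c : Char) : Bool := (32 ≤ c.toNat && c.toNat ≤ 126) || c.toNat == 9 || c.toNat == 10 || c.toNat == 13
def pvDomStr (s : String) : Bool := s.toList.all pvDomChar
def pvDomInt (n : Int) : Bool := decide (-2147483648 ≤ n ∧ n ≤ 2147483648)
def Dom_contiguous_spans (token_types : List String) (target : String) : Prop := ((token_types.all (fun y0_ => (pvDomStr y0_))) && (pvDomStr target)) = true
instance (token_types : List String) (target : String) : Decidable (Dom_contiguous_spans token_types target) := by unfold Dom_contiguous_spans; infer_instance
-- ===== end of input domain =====

-- B rewrites A's nested while loops (look-ahead scan for the run's end, then jump) as one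
-- flat pass keeping an optional run start; objective: simpler.

-- ===== PORT A =====
-- inner while loop: 'while j + 1 < n and token_types[j + 1] == target: j += 1'
def csInner (token_types : List String) (target : String) (n : Int) (j : Int) : Int :=
  if _h : j + 1 < n ∧ PySem.List.pyGetD token_types (j + 1) "" = target then
    csInner token_types target n (j + 1)
  else j
termination_by (n - j).toNat
decreasing_by omega

theorem csInner_ge (token_types : List String) (target : String) (n j : Int) :
    j ≤ csInner token_types target n j := by
  fun_induction csInner with
  | case1 j h ih => omega
  | case2 j h => omega

-- outer while loop of A
def csLoop (token_types : List String) (target : String) (n : Int) (i : Int)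
    (spans : List (Int × Int)) : List (Int × Int) :=
  if _h : i < n then
    if PySem.List.pyGetD token_types i "" ≠ target then
      csLoop token_types target n (i + 1) spans
    else
      let j := csInner token_types target n i
      csLoop token_types target n (j + 1) (spans ++ [(i, j)])
  else spans
termination_by (n - i).toNat
decreasing_by
  · omega
  · have := csInner_ge token_types target n i; omega

def contiguous_spans (token_types : List String) (target : String) : List (Int × Int) :=
  csLoop token_types target (token_types.length : Int) 0 []

-- ===== PORT B =====
def bStep (target : String) (st : List (Int × Int) × Option Int) (p : Int × String) :
    List (Int × Int) × Option Int :=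
  match st.2 with
  | none => if p.2 = target then (st.1, some p.1) else (st.1, none)
  | some s => if p.2 = target then (st.1, some s) else (st.1 ++ [(s, p.1 - 1)], none)

def contiguous_spans_alt (token_types : List String) (target : String) : List (Int × Int) :=
  let st := (PySem.List.enumerate token_types 0).foldl (bStep target) ([], none)
  match st.2 with
  | none => st.1
  | some s => st.1 ++ [(s, (token_types.length : Int) - 1)]

-- ===== PRECONDITION & SPEC =====
def Spec_contiguous_spans (token_types : List String) (target : String) (out : List (Int × Int)) : Prop := out = contiguous_spans_alt token_types target
instance (token_types : List String) (target : String) (out : List (Int × Int)) : Decidable (Spec_contiguous_spans token_types target out) := by unfold Spec_contiguous_spans; infer_instance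

-- ===== CLAIM (what is proved, stated in full; the proofs are below) =====
def Claim_equal_contiguous_spans : Prop := ∀ (token_types : List String) (target : String), Dom_contiguous_spans token_types target → Spec_contiguous_spans token_types target (contiguous_spans token_types target)

-- ===== LEMMAS AND PROOFS =====

-- Common characterisation: the runs of `target` in `l`, with `k` the index of l's head.
mutual
def scanRuns (target : String) : List String → Int → List (Int × Int)
  | [], _ => []
  | x :: xs, k => if x = target then inRun target xs k (k + 1) else scanRuns target xs (k + 1)
-- inside a run that started at s; tokens s..k-1 are target, `rest` starts at index k
def inRun (target : String) : List String → Int → Int → List (Int × Int)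
  | [], s, k => [(s, k - 1)]
  | x :: xs, s, k =>
      if x = target then inRun target xs s (k + 1)
      else (s, k - 1) :: scanRuns target xs (k + 1)
end

-- ---- B side: the fold over enumerate computes the runs ----
def bFinish (nf : Int) (st : List (Int × Int) × Option Int) : List (Int × Int) :=
  match st.2 with
  | none => st.1
  | some s => st.1 ++ [(s, nf)]

theorem foldB_pair (target : String) (l : List String) : ∀ (k : Int) (spans : List (Int × Int)),
    (bFinish (k + l.length - 1) ((PySem.List.enumerate l k).foldl (bStep target) (spans, none)) =
      spans ++ scanRuns target l k) ∧
    (∀ s : Int,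
      bFinish (k + l.length - 1) ((PySem.List.enumerate l k).foldl (bStep target) (spans, some s)) =
      spans ++ inRun target l s k) := by
  induction l with
  | nil =>
    intro k spans
    constructor
    · simp [PySem.List.enumerate, bFinish, scanRuns]
    · intro s; simp [PySem.List.enumerate, bFinish, inRun]
  | cons x xs ih =>
    intro k spans
    have hlen : k + ((x :: xs).length : Int) - 1 = (k + 1) + (xs.length : Int) - 1 := by
      simp; ring
    constructor
    · rw [PySem.List.enumerate_cons, List.foldl_cons, hlen]
      by_cases hx : x = target
      · simp only [bStep, hx, if_true]
        rw [(ih (k + 1) spans).2 k]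
        simp [scanRuns]
      · simp only [bStep, if_neg hx]
        rw [(ih (k + 1) spans).1]
        simp [scanRuns, hx]
    · intro s
      rw [PySem.List.enumerate_cons, List.foldl_cons, hlen]
      by_cases hx : x = target
      · simp only [bStep, hx, if_true]
        rw [(ih (k + 1) spans).2 s]
        simp [inRun]
      · simp only [bStep, if_neg hx]
        rw [(ih (k + 1) (spans ++ [(s, k - 1)])).1]
        simp [inRun, hx]

theorem alt_eq_scan (token_types : List String) (target : String) :
    contiguous_spans_alt token_types target = scanRuns target token_types 0 := by
  have h := (foldB_pair target token_types 0 []).1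
  simp only [zero_add] at h
  calc contiguous_spans_alt token_types target
      = bFinish ((token_types.length : Int) - 1)
          ((PySem.List.enumerate token_types 0).foldl (bStep target) ([], none)) := rfl
    _ = scanRuns target token_types 0 := by rw [h]; simp

-- ---- A side ----
theorem csInner_inRun (tys : List String) (target : String) (s : Int) :
    ∀ (m : Nat) (j : Int), ((tys.length : Int) - j).toNat ≤ m → 0 ≤ j →
    inRun target (tys.drop (j + 1).toNat) s (j + 1) =
      (s, csInner tys target (tys.length : Int) j) ::
        scanRuns target (tys.drop ((csInner tys target (tys.length : Int) j) + 1).toNat)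
          ((csInner tys target (tys.length : Int) j) + 1) := by
  intro m
  induction m with
  | zero =>
    intro j hm hj
    rw [csInner]
    have hjn : ¬ (j + 1 < (tys.length : Int) ∧ PySem.List.pyGetD tys (j + 1) "" = target) := by
      intro ⟨h1, _⟩; omega
    rw [dif_neg hjn]
    have hd : tys.drop (j + 1).toNat = [] := List.drop_eq_nil_of_le (by omega)
    rw [hd]
    simp [inRun, scanRuns]
  | succ m ih =>
    intro j hm hj
    rw [csInner]
    by_cases h : j + 1 < (tys.length : Int) ∧ PySem.List.pyGetD tys (j + 1) "" = target
    · rw [dif_pos h]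
      obtain ⟨h1, h2⟩ := h
      have hlt : (j + 1).toNat < tys.length := by omega
      have hd : tys.drop (j + 1).toNat = tys[(j + 1).toNat] :: tys.drop ((j + 1).toNat + 1) :=
        List.drop_eq_getElem_cons hlt
      have hget : tys[(j + 1).toNat] = target := by
        rw [← PySem.List.pyGetD_eq_getElem tys "" (by omega) (by omega), h2]
      have hidx : (j + 1).toNat + 1 = (j + 1 + 1).toNat := by omega
      rw [hd, hget]
      simp only [inRun, if_pos trivial]
      rw [hidx]
      exact ih (j + 1) (by omega) (by omega)
    · rw [dif_neg h]
      by_cases h1 : j + 1 < (tys.length : Int)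
      · have h2 : PySem.List.pyGetD tys (j + 1) "" ≠ target := fun hc => h ⟨h1, hc⟩
        have hlt : (j + 1).toNat < tys.length := by omega
        have hd : tys.drop (j + 1).toNat = tys[(j + 1).toNat] :: tys.drop ((j + 1).toNat + 1) :=
          List.drop_eq_getElem_cons hlt
        have hget : tys[(j + 1).toNat] ≠ target := by
          rw [← PySem.List.pyGetD_eq_getElem tys "" (by omega) (by omega)]; exact h2
        have hidx : (j + 1).toNat + 1 = (j + 1 + 1).toNat := by omega
        rw [hd]
        simp only [inRun, scanRuns, if_neg hget]
        rw [hidx]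
        simp
      · have hd : tys.drop (j + 1).toNat = [] := List.drop_eq_nil_of_le (by omega)
        rw [hd]
        simp [inRun, scanRuns]

theorem csLoop_scan (tys : List String) (target : String) :
    ∀ (m : Nat) (i : Int) (spans : List (Int × Int)),
      ((tys.length : Int) - i).toNat ≤ m → 0 ≤ i →
      csLoop tys target (tys.length : Int) i spans =
        spans ++ scanRuns target (tys.drop i.toNat) i := by
  intro m
  induction m with
  | zero =>
    intro i spans hm hi
    rw [csLoop]
    have hn : ¬ i < (tys.length : Int) := by omega
    rw [dif_neg hn]
    have hd : tys.drop i.toNat = [] := List.drop_eq_nil_of_le (by omega)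
    rw [hd]; simp [scanRuns]
  | succ m ih =>
    intro i spans hm hi
    rw [csLoop]
    by_cases hn : i < (tys.length : Int)
    · rw [dif_pos hn]
      have hlt : i.toNat < tys.length := by omega
      have hd : tys.drop i.toNat = tys[i.toNat] :: tys.drop (i.toNat + 1) :=
        List.drop_eq_getElem_cons hlt
      have hgd : PySem.List.pyGetD tys i "" = tys[i.toNat] :=
        PySem.List.pyGetD_eq_getElem tys "" hi (by omega)
      have hidx : i.toNat + 1 = (i + 1).toNat := by omega
      by_cases hx : PySem.List.pyGetD tys i "" = target
      · rw [if_neg (by simpa using hx)]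
        have hge := csInner_ge tys target (tys.length : Int) i
        rw [ih (csInner tys target (tys.length : Int) i + 1) (spans ++ [(i, csInner tys target (tys.length : Int) i)]) (by omega) (by omega)]
        rw [hd]
        have hhead : tys[i.toNat] = target := by rw [← hgd]; exact hx
        simp only [scanRuns, hhead, if_pos trivial]
        rw [hidx]
        rw [csInner_inRun tys target i (((tys.length : Int) - i).toNat) i (by omega) hi]
        simp
      · rw [if_pos (by simpa using hx)]
        rw [ih (i + 1) spans (by omega) (by omega)]
        rw [hd]
        have hhead : tys[i.toNat] ≠ target := by rw [← hgd]; exact hx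
        simp only [scanRuns, if_neg hhead]
        rw [hidx]
    · rw [dif_neg hn]
      have hd : tys.drop i.toNat = [] := List.drop_eq_nil_of_le (by omega)
      rw [hd]; simp [scanRuns]

-- ===== VERDICT (by name: the statement is the Claim_ definition above) =====
theorem contiguous_spans_spec : Claim_equal_contiguous_spans := by
  intro token_types target _
  unfold Spec_contiguous_spans
  rw [alt_eq_scan]
  have h := csLoop_scan token_types target ((token_types.length : Int) - 0).toNat 0 []
    (by omega) (by omega)
  simpa [contiguous_spans] using h
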